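-- pv_equiv track=rewrite | github.com/VersionClimber/VersionClimber | versionclimber/algo/demandsupply.py | findanchors
-- ===== SOURCE A (Python) =====
-- def findanchors(miniseries):
--   out = []
--   i = 0
--   currentpackage = ''
--   new = []
--   for p in miniseries:
--     if not p[0] == currentpackage:
--       currentpackage = p[0]
--       if 0 < len(new):
--         out.append(new)
--         new = []
--     if p[1] == 'demand-constant':
--       new.append([p[0], p[2][-1]])
--     elif p[1] == 'supply-constant':
--       new.append([p[0], p[2][0]])
--   if 0 < len(new):
--     out.append(new)
--   return out
-- ===== SOURCE B (Python) =====
-- def findanchors(miniseries):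
--     # Two-phase: split into consecutive same-package runs, then map each run
--     # to its anchor rows and keep the non-empty ones (no flush state machine).
--     result = []
--     i, n = 0, len(miniseries)
--     while i < n:
--         pkg = miniseries[i][0]
--         j = i
--         while j < n and miniseries[j][0] == pkg:
--             j += 1
--         anchors = []
--         for p in miniseries[i:j]:
--             if p[1] == 'demand-constant':
--                 anchors.append([p[0], p[2][-1]])
--             elif p[1] == 'supply-constant':
--                 anchors.append([p[0], p[2][0]])
--         if anchors:
--             result.append(anchors)
--         i = j
--     return result
-- ===== Notes on version B (the rewrite author's own statement) =====
-- stated objective: simpler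
-- what changed: Replaces A's single-pass flush state machine (currentpackage sentinel, buffer flushed on package change and after the loop) by a two-phase decomposition: split the list into maximal consecutive same-package runs, then map each run to its anchor rows and keep the non-empty ones.
import Mathlib
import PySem

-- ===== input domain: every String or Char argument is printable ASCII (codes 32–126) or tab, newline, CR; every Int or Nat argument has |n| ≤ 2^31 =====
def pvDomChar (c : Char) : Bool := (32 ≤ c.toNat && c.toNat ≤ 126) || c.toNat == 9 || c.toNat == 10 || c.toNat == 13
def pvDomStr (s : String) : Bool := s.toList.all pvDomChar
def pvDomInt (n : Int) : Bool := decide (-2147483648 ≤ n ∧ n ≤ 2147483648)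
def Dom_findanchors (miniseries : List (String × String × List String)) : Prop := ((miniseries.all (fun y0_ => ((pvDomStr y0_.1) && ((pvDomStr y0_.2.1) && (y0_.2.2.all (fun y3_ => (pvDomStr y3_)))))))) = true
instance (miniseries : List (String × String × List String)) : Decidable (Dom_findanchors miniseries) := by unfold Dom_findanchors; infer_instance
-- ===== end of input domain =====

-- B replaces A's flush state machine by a split-into-runs + map decomposition (simpler; same cost).

-- ===== PORT A =====
-- A's loop body: possible flush on package change, then conditional append of the anchor row.
-- p[2][-1] / p[2][0] are PySem.List.pyGet? (IndexError totalized with getD ""; Pre_ excludes those inputs).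
def pvStepA (st : List (List (List String)) × String × List (List String))
    (p : String × String × List String) :
    List (List (List String)) × String × List (List String) :=
  let st1 :=
    if ¬ (p.1 = st.2.1) then
      (if 0 < st.2.2.length then (st.1 ++ [st.2.2], p.1, ([] : List (List String)))
       else (st.1, p.1, st.2.2))
    else st
  if p.2.1 = "demand-constant" then
    (st1.1, st1.2.1, st1.2.2 ++ [[p.1, (PySem.List.pyGet? p.2.2 (-1)).getD ""]])
  else if p.2.1 = "supply-constant" then
    (st1.1, st1.2.1, st1.2.2 ++ [[p.1, (PySem.List.pyGet? p.2.2 0).getD ""]])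
  else st1

def findanchors (miniseries : List (String × String × List String)) : List (List (List String)) :=
  let st := miniseries.foldl pvStepA ([], "", [])
  if 0 < st.2.2.length then st.1 ++ [st.2.2] else st.1

-- ===== PORT B =====
-- anchor rows of one same-package run (the inner 'for p in miniseries[i:j]' loop of B)
def pvAnchorsRun (run : List (String × String × List String)) : List (List String) :=
  run.foldl (fun anchors p =>
    if p.2.1 = "demand-constant" then anchors ++ [[p.1, (PySem.List.pyGet? p.2.2 (-1)).getD ""]]
    else if p.2.1 = "supply-constant" then anchors ++ [[p.1, (PySem.List.pyGet? p.2.2 0).getD ""]]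
    else anchors) []

-- B's outer while loop: peel off the maximal run of the first package, recurse on the rest.
def findanchors_alt : List (String × String × List String) → List (List (List String))
  | [] => []
  | p :: rest =>
    let anchors := pvAnchorsRun (p :: rest.takeWhile (fun q => q.1 == p.1))
    let tail := findanchors_alt (rest.dropWhile (fun q => q.1 == p.1))
    if 0 < anchors.length then anchors :: tail else tail
termination_by ms => ms.length
decreasing_by
  simp only [List.length_cons]
  exact Nat.lt_succ_of_le (List.length_dropWhile_le _ _)

-- ===== PRECONDITION & SPEC =====
-- Pre_ excludes exactly the inputs where Python A raises IndexError: a 'demand-constant'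
-- or 'supply-constant' record whose version list p[2] is empty (B raises there too).
def Pre_findanchors (miniseries : List (String × String × List String)) : Prop :=
  ∀ p ∈ miniseries, (p.2.1 = "demand-constant" ∨ p.2.1 = "supply-constant") → p.2.2 ≠ []

instance (miniseries : List (String × String × List String)) : Decidable (Pre_findanchors miniseries) := by
  unfold Pre_findanchors; infer_instance

def pvWitness_findanchors : (List (String × String × List String)) :=
  [("a", "demand-constant", ["1", "2"]), ("a", "supply-constant", ["3"]), ("b", "x", ["y"])]

def Spec_findanchors (miniseries : List (String × String × List String)) (out : List (List (List String))) : Prop := out = findanchors_alt miniseries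
instance (miniseries : List (String × String × List String)) (out : List (List (List String))) : Decidable (Spec_findanchors miniseries out) := by unfold Spec_findanchors; infer_instance

-- ===== CLAIM (what is proved, stated in full; the proofs are below) =====
def Claim_equal_findanchors : Prop := ∀ (miniseries : List (String × String × List String)), Dom_findanchors miniseries → Pre_findanchors miniseries → Spec_findanchors miniseries (findanchors miniseries)

-- ===== LEMMAS AND PROOFS =====

-- the anchor rows contributed by a single record
def pvEnt (p : String × String × List String) : List (List String) :=
  if p.2.1 = "demand-constant" then [[p.1, (PySem.List.pyGet? p.2.2 (-1)).getD ""]]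
  else if p.2.1 = "supply-constant" then [[p.1, (PySem.List.pyGet? p.2.2 0).getD ""]]
  else []

-- A's end-of-group flush
def pvFlush (out : List (List (List String))) (new : List (List String)) : List (List (List String)) :=
  if 0 < new.length then out ++ [new] else out

theorem pvAnchorsRun_eq_flatMap (run : List (String × String × List String)) :
    pvAnchorsRun run = run.flatMap pvEnt := by
  unfold pvAnchorsRun
  rw [PySem.List.foldl_congr_mem (g := fun acc p => acc ++ pvEnt p)
      (h := by intro acc p _; simp only [pvEnt]; split_ifs <;> simp)]
  exact PySem.List.foldl_append_eq_flatMap pvEnt run []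

theorem pvStepA_inrun (out : List (List (List String))) (cur : String)
    (new : List (List String)) (p : String × String × List String) (h : p.1 = cur) :
    pvStepA (out, cur, new) p = (out, cur, new ++ pvEnt p) := by
  simp only [pvStepA, pvEnt, h]
  split_ifs <;> simp_all

theorem pvStepA_start (out : List (List (List String))) (cur : String)
    (new : List (List String)) (p : String × String × List String)
    (h : new = [] ∨ ¬ p.1 = cur) :
    pvStepA (out, cur, new) p = (pvFlush out new, p.1, pvEnt p) := by
  rcases h with h | h
  · subst h
    simp only [pvStepA, pvEnt, pvFlush]
    split_ifs <;> simp_all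
  · simp only [pvStepA, pvEnt, pvFlush, h]
    split_ifs <;> simp_all

theorem pvFoldA_run (run : List (String × String × List String)) (c : String)
    (h : ∀ q ∈ run, q.1 = c) :
    ∀ (out : List (List (List String))) (new : List (List String)),
      List.foldl pvStepA (out, c, new) run = (out, c, new ++ run.flatMap pvEnt) := by
  induction run with
  | nil => simp
  | cons q run ih =>
    intro out new
    have hq : q.1 = c := h q (by simp)
    rw [List.foldl_cons, pvStepA_inrun _ _ _ _ hq,
        ih (fun r hr => h r (by simp [hr])) out (new ++ pvEnt q)]
    simp

theorem pvFoldA_main (n : Nat) :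
    ∀ (ms : List (String × String × List String)), ms.length ≤ n →
    ∀ (out : List (List (List String))) (cur : String) (new : List (List String)),
      (∀ p, ms.head? = some p → new = [] ∨ ¬ p.1 = cur) →
      (let st := List.foldl pvStepA (out, cur, new) ms
       if 0 < st.2.2.length then st.1 ++ [st.2.2] else st.1) =
      pvFlush out new ++ findanchors_alt ms := by
  induction n with
  | zero =>
    intro ms hlen out cur new _
    have hms : ms = [] := List.eq_nil_of_length_eq_zero (Nat.le_zero.mp hlen)
    subst hms
    simp [findanchors_alt, pvFlush]
  | succ n ih =>
    intro ms hlen out cur new hh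
    cases ms with
    | nil => simp [findanchors_alt, pvFlush]
    | cons p rest =>
      have hstart : new = [] ∨ ¬ p.1 = cur := hh p rfl
      have hsplit : rest = rest.takeWhile (fun q => q.1 == p.1) ++ rest.dropWhile (fun q => q.1 == p.1) :=
        (List.takeWhile_append_dropWhile).symm
      have hrun : ∀ q ∈ rest.takeWhile (fun q => q.1 == p.1), q.1 = p.1 := by
        intro q hq
        simpa using List.mem_takeWhile_imp hq
      have hlen' : (rest.dropWhile (fun q => q.1 == p.1)).length ≤ n := by
        have h1 := List.length_dropWhile_le (fun q => q.1 == p.1) rest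
        simp only [List.length_cons] at hlen
        omega
      have hhead : ∀ q, (rest.dropWhile (fun q => q.1 == p.1)).head? = some q →
          pvEnt p ++ (rest.takeWhile (fun q => q.1 == p.1)).flatMap pvEnt = [] ∨ ¬ q.1 = p.1 := by
        intro q hq
        right
        have := List.head?_dropWhile_not (fun q => q.1 == p.1) rest
        rw [hq] at this
        simpa using this
      calc
        (let st := List.foldl pvStepA (out, cur, new) (p :: rest)
         if 0 < st.2.2.length then st.1 ++ [st.2.2] else st.1)
            = (let st := List.foldl pvStepA
                  (pvFlush out new, p.1, pvEnt p ++ (rest.takeWhile (fun q => q.1 == p.1)).flatMap pvEnt)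
                  (rest.dropWhile (fun q => q.1 == p.1))
               if 0 < st.2.2.length then st.1 ++ [st.2.2] else st.1) := by
          conv_lhs => rw [List.foldl_cons, pvStepA_start _ _ _ _ hstart, hsplit]
          rw [List.foldl_append, pvFoldA_run _ _ hrun]
        _ = pvFlush (pvFlush out new) (pvEnt p ++ (rest.takeWhile (fun q => q.1 == p.1)).flatMap pvEnt)
              ++ findanchors_alt (rest.dropWhile (fun q => q.1 == p.1)) := ih _ hlen' _ _ _ hhead
        _ = pvFlush out new ++ findanchors_alt (p :: rest) := by
          rw [findanchors_alt]
          simp only [pvAnchorsRun_eq_flatMap, List.flatMap_cons, pvFlush]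
          split_ifs <;> simp

-- ===== VERDICT (by name: the statement is the Claim_ definition above) =====
theorem findanchors_spec : Claim_equal_findanchors := by
  intro ms _ _
  unfold Spec_findanchors findanchors
  have := pvFoldA_main ms.length ms (le_refl _) [] "" [] (by intro p _; left; rfl)
  simpa [pvFlush] using this
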